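-- pv_equiv track=rewrite | github.com/MicheleMolineri/4A_ROB_Sistemi_E_Reti- | Pitone/EsPitone/es047(contaControllaRighe).py | controllaCommento
-- ===== SOURCE A (Python) =====
-- def controllaCommento(testo):
--     contaCommenti,contaPrintf=0,0
--     for linea in testo:
--         for parola in linea.split():
--             if parola == "//":
--                 contaCommenti+=1
--             if parola == "printf":
--                 contaPrintf+=1
--
--     return contaCommenti,contaPrintf
-- ===== SOURCE B (Python) =====
-- def controllaCommento(testo):
--     commenti, stampe = 0, 0
--     for linea in testo:
--         parola = ""
--         for ch in linea + " ":
--             if ch.isspace():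
--                 if parola == "//":
--                     commenti += 1
--                 elif parola == "printf":
--                     stampe += 1
--                 parola = ""
--             else:
--                 parola += ch
--     return commenti, stampe
-- ===== Notes on version B (the rewrite author's own statement) =====
-- stated objective: alternative
-- what changed: B never calls split(): it tokenizes each line itself with a character-level state machine (word accumulator flushed at whitespace, sentinel trailing space), counting the two tokens at each flush, instead of A's split()-then-compare nested loops.
import Mathlib
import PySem

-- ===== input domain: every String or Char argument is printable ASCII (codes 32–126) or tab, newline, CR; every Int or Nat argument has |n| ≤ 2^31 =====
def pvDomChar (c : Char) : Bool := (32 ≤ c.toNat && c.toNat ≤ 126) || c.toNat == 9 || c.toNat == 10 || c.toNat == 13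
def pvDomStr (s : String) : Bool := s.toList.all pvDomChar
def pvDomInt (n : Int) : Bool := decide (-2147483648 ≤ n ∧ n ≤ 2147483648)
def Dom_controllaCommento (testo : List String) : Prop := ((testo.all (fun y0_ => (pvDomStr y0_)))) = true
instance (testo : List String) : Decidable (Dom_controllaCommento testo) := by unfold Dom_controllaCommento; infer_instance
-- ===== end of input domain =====

-- B replaces A's split()-then-compare loops with a character-level tokenizer: an explicit
-- state machine over each line's characters (word accumulator, flushed at whitespace), never calling split; alternative, same cost.

-- ===== PORT A =====
def controllaCommento (testo : List String) : Int × Int :=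
  testo.foldl (fun st linea =>
    (PySem.Str.split₀ linea).foldl (fun st parola =>
      let st := if parola == "//" then (st.1 + 1, st.2) else st
      if parola == "printf" then (st.1, st.2 + 1) else st) st) ((0 : Int), (0 : Int))

-- ===== PORT B =====
-- flush of the accumulated word at a whitespace character (the if/elif in Source B)
def pvFlush (parola : List Char) (st : Int × Int) : Int × Int :=
  if parola = "//".toList then (st.1 + 1, st.2)
  else if parola = "printf".toList then (st.1, st.2 + 1)
  else st

-- Source B's inner character loop over `linea + " "`; parola kept as its character list
def pvLineB (cs : List Char) (parola : List Char) (st : Int × Int) : Int × Int :=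
  match cs with
  | [] => st
  | c :: rest =>
    if PySem.Chars.isspace c then pvLineB rest [] (pvFlush parola st)
    else pvLineB rest (parola ++ [c]) st

def controllaCommento_alt (testo : List String) : Int × Int :=
  testo.foldl (fun st linea => pvLineB (linea.toList ++ [' ']) [] st) ((0 : Int), (0 : Int))

-- ===== PRECONDITION & SPEC =====
def Spec_controllaCommento (testo : List String) (out : Int × Int) : Prop := out = controllaCommento_alt testo
instance (testo : List String) (out : Int × Int) : Decidable (Spec_controllaCommento testo out) := by unfold Spec_controllaCommento; infer_instance

-- ===== CLAIM (what is proved, stated in full; the proofs are below) =====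
def Claim_equal_controllaCommento : Prop := ∀ (testo : List String), Dom_controllaCommento testo → Spec_controllaCommento testo (controllaCommento testo)

-- ===== LEMMAS AND PROOFS =====

-- A's word step
def pvStepA (st : Int × Int) (parola : String) : Int × Int :=
  let st := if parola == "//" then (st.1 + 1, st.2) else st
  if parola == "printf" then (st.1, st.2 + 1) else st

theorem pvOfList_eq (cur : List Char) (t : String) :
    (String.ofList cur = t) ↔ cur = t.toList := by
  constructor
  · intro h; have := congrArg String.toList h; simpa using this
  · intro h; subst h; simp

theorem pvStepA_flush (cur : List Char) (st : Int × Int) :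
    pvStepA st (String.ofList cur) = pvFlush cur st := by
  unfold pvStepA pvFlush
  simp only [beq_iff_eq, pvOfList_eq]
  split_ifs with h1 h2 h3 <;> simp_all

-- split₀.go's accumulator is a reversed prefix of its result
theorem pv_go_append (cs cur : List Char) (acc : List (List Char)) :
    PySem.Chars.split₀.go cs cur acc = acc.reverse ++ PySem.Chars.split₀.go cs cur [] := by
  induction cs generalizing cur acc with
  | nil =>
    rw [PySem.Chars.split₀.go.eq_1, PySem.Chars.split₀.go.eq_1]
    by_cases h : cur.isEmpty <;> simp [h]
  | cons c rest ih =>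
    rw [PySem.Chars.split₀.go.eq_2, PySem.Chars.split₀.go.eq_2]
    by_cases hs : PySem.Chars.isspace c
    · by_cases h : cur.isEmpty
      · simp only [hs, h, if_true]
        exact ih [] acc
      · simp only [hs, h, if_true, Bool.false_eq_true, if_false]
        rw [ih [] (cur.reverse :: acc), ih [] [cur.reverse]]
        simp
    · simp only [hs, Bool.false_eq_true, if_false]
      exact ih _ acc

-- core invariant: B's char loop over cs ++ ' ' equals A's word loop over split₀.go's words
theorem pv_line (cs cur : List Char) (st : Int × Int) :
    pvLineB (cs ++ [' ']) cur st
      = ((PySem.Chars.split₀.go cs cur.reverse []).map String.ofList).foldl pvStepA st := by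
  induction cs generalizing cur st with
  | nil =>
    rw [List.nil_append, PySem.Chars.split₀.go.eq_1]
    by_cases h : cur = []
    · subst h
      simp [pvLineB, pvFlush]
    · have hr : cur.reverse.isEmpty = false := by simp [h]
      simp only [pvLineB]
      rw [if_pos (by decide : PySem.Chars.isspace ' ' = true)]
      simp [hr, ← pvStepA_flush]
  | cons c rest ih =>
    rw [List.cons_append, PySem.Chars.split₀.go.eq_2]
    by_cases hs : PySem.Chars.isspace c
    · by_cases h : cur = []
      · subst h
        simp only [pvLineB, hs, if_true]
        rw [ih]
        simp [pvFlush]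
      · have hr : cur.reverse.isEmpty = false := by simp [h]
        simp only [pvLineB, hs, if_true, hr, Bool.false_eq_true, if_false]
        rw [ih, pv_go_append rest [] [cur.reverse.reverse]]
        simp [← pvStepA_flush]
    · simp only [pvLineB, hs, Bool.false_eq_true, if_false]
      rw [ih]
      simp

-- ===== VERDICT (by name: the statement is the Claim_ definition above) =====
theorem controllaCommento_spec : Claim_equal_controllaCommento := by
  intro testo _
  show controllaCommento testo = controllaCommento_alt testo
  unfold controllaCommento controllaCommento_alt
  have hfun : (fun (st : Int × Int) (linea : String) => pvLineB (linea.toList ++ [' ']) [] st)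
      = (fun (st : Int × Int) (linea : String) =>
          (PySem.Str.split₀ linea).foldl (fun st parola =>
            let st := if parola == "//" then (st.1 + 1, st.2) else st
            if parola == "printf" then (st.1, st.2 + 1) else st) st) := by
    funext st linea
    rw [pv_line linea.toList [] st]
    rfl
  rw [hfun]
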